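-- pv_equiv track=rewrite | github.com/skuzair/ThreatLens | correlation_engine/risk_calculator.py | _infer_mitre_severity
-- ===== SOURCE A (Python) =====
-- from typing import Dict, List
--
-- def _infer_mitre_severity(ttps: List[str]) -> str:
--     """Simple heuristic for MITRE severity"""
--     if not ttps:
--         return "low"
--
--     critical_ttps = {"T1486", "T1490", "T1498"}
--     high_ttps = {"T1041", "T1071", "T1021", "T1068"}
--     medium_ttps = {"T1078", "T1110", "T1595"}
--
--     if any(t in critical_ttps for t in ttps):
--         return "critical"
--     elif any(t in high_ttps for t in ttps):
--         return "high"
--     elif any(t in medium_ttps for t in ttps):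
--         return "medium"
--     else:
--         return "low"
-- ===== SOURCE B (Python) =====
-- from typing import Dict, List
--
-- def _infer_mitre_severity(ttps: List[str]) -> str:
--     """Simple heuristic for MITRE severity (single-pass max over a rank index)."""
--     rank = {
--         "T1486": 3, "T1490": 3, "T1498": 3,
--         "T1041": 2, "T1071": 2, "T1021": 2, "T1068": 2,
--         "T1078": 1, "T1110": 1, "T1595": 1,
--     }
--     best = 0
--     for t in ttps:
--         best = max(best, rank.get(t, 0))
--     return {3: "critical", 2: "high", 1: "medium"}.get(best, "low")
-- ===== Notes on version B (the rewrite author's own statement) =====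
-- stated objective: simpler
-- what changed: Replaces the three ordered any()-scans over separate severity sets by one maximizing pass over a prebuilt TTP-to-rank dict, mapping the best rank back to a label at the end.
import Mathlib
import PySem

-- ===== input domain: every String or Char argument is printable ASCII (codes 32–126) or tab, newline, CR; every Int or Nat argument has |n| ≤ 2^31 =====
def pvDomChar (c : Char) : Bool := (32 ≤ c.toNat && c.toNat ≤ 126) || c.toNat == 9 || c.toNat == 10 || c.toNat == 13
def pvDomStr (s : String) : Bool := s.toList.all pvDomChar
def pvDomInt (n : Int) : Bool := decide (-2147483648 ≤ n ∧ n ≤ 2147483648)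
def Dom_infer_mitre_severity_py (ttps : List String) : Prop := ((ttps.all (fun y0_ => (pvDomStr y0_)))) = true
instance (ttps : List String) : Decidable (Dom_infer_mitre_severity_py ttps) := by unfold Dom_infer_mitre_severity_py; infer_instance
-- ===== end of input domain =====

-- B replaces A's three ordered any()-scans by one max-tracking pass over a rank dict; objective: simpler.

-- ===== PORT A =====
def infer_mitre_severity_py (ttps : List String) : String :=
  if ttps = [] then "low"
  else
    let critical_ttps : PySem.Set String := PySem.Set.ofList ["T1486", "T1490", "T1498"]
    let high_ttps : PySem.Set String := PySem.Set.ofList ["T1041", "T1071", "T1021", "T1068"]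
    let medium_ttps : PySem.Set String := PySem.Set.ofList ["T1078", "T1110", "T1595"]
    if ttps.any (fun t => PySem.Set.contains critical_ttps t) then "critical"
    else if ttps.any (fun t => PySem.Set.contains high_ttps t) then "high"
    else if ttps.any (fun t => PySem.Set.contains medium_ttps t) then "medium"
    else "low"

-- ===== PORT B =====
def pvRankDict : PySem.Dict String Int :=
  PySem.Dict.ofList [("T1486", 3), ("T1490", 3), ("T1498", 3),
                     ("T1041", 2), ("T1071", 2), ("T1021", 2), ("T1068", 2),
                     ("T1078", 1), ("T1110", 1), ("T1595", 1)]

def infer_mitre_severity_py_alt (ttps : List String) : String :=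
  let best := ttps.foldl (fun b t => max b (pvRankDict.getD t 0)) 0
  (PySem.Dict.ofList [((3 : Int), "critical"), (2, "high"), (1, "medium")]).getD best "low"

-- ===== PRECONDITION & SPEC =====
def Spec_infer_mitre_severity_py (ttps : List String) (out : String) : Prop := out = infer_mitre_severity_py_alt ttps
instance (ttps : List String) (out : String) : Decidable (Spec_infer_mitre_severity_py ttps out) := by unfold Spec_infer_mitre_severity_py; infer_instance

-- ===== CLAIM (what is proved, stated in full; the proofs are below) =====
def Claim_equal_infer_mitre_severity_py : Prop := ∀ (ttps : List String), Dom_infer_mitre_severity_py ttps → Spec_infer_mitre_severity_py ttps (infer_mitre_severity_py ttps)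

-- ===== LEMMAS AND PROOFS =====

-- the rank picked from the dict, characterised as an if-chain over the three membership groups
theorem pvRank_char (t : String) :
    pvRankDict.getD t 0 =
      (if t = "T1486" ∨ t = "T1490" ∨ t = "T1498" then 3
       else if t = "T1041" ∨ t = "T1071" ∨ t = "T1021" ∨ t = "T1068" then 2
       else if t = "T1078" ∨ t = "T1110" ∨ t = "T1595" then 1
       else 0) := by
  have h : pvRankDict = PySem.Dict.mk [("T1486", 3), ("T1490", 3), ("T1498", 3),
      ("T1041", 2), ("T1071", 2), ("T1021", 2), ("T1068", 2),
      ("T1078", 1), ("T1110", 1), ("T1595", 1)] := by decide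
  rw [h]
  simp only [PySem.Dict.getD, PySem.Dict.get?_mk_cons, beq_iff_eq]
  split_ifs <;> subst_vars <;> simp_all [PySem.Dict.get?, eq_comm]

theorem pvRank_bounds (t : String) : 0 ≤ pvRankDict.getD t 0 ∧ pvRankDict.getD t 0 ≤ 3 := by
  rw [pvRank_char]; split_ifs <;> omega

-- the maximum rank of a list, as a foldr
def pvM (l : List String) : Int := l.foldr (fun t a => max (pvRankDict.getD t 0) a) 0

theorem pvM_nonneg (l : List String) : 0 ≤ pvM l := by
  induction l with
  | nil => simp [pvM]
  | cons x xs ih => simp only [pvM, List.foldr] at *; omega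

theorem pvFoldl_eq_M (l : List String) (b : Int) (hb : 0 ≤ b) :
    l.foldl (fun b t => max b (pvRankDict.getD t 0)) b = max b (pvM l) := by
  induction l generalizing b with
  | nil => simp [pvM]; omega
  | cons x xs ih =>
    have hr := pvRank_bounds x
    simp only [List.foldl, pvM, List.foldr] at *
    rw [ih (max b (pvRankDict.getD x 0)) (by omega)]
    omega

theorem pvM_ge_mem (l : List String) (t : String) (ht : t ∈ l) :
    pvRankDict.getD t 0 ≤ pvM l := by
  induction l with
  | nil => cases ht
  | cons x xs ih =>
    simp only [pvM, List.foldr] at *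
    rcases List.mem_cons.1 ht with h | h
    · subst h; omega
    · have := ih h; omega

theorem pvM_le (l : List String) (k : Int) (hk : 0 ≤ k)
    (h : ∀ t ∈ l, pvRankDict.getD t 0 ≤ k) : pvM l ≤ k := by
  induction l with
  | nil => simpa [pvM]
  | cons x xs ih =>
    simp only [pvM, List.foldr] at *
    have h1 := h x (by simp)
    have h2 := ih (fun t ht => h t (by simp [ht]))
    omega

-- ===== VERDICT (by name: the statement is the Claim_ definition above) =====
theorem infer_mitre_severity_py_spec : Claim_equal_infer_mitre_severity_py := by
  intro ttps _
  unfold Spec_infer_mitre_severity_py infer_mitre_severity_py infer_mitre_severity_py_alt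
  by_cases h0 : ttps = []
  · subst h0; decide
  rw [if_neg h0]
  rw [pvFoldl_eq_M ttps 0 le_rfl]
  have hM0 := pvM_nonneg ttps
  rw [max_eq_right hM0]
  by_cases h1 : ttps.any (fun t => PySem.Set.contains (PySem.Set.ofList ["T1486", "T1490", "T1498"]) t) = true
  · -- some critical TTP present: M = 3
    obtain ⟨t, ht, hc⟩ := List.any_eq_true.1 h1
    have hmem : t = "T1486" ∨ t = "T1490" ∨ t = "T1498" := by
      have := (PySem.Set.contains_iff _ _).1 hc
      simpa [PySem.Set.mem_ofList] using this
    have hrt : pvRankDict.getD t 0 = 3 := by rw [pvRank_char, if_pos hmem]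
    have hge := pvM_ge_mem ttps t ht
    have hle := pvM_le ttps 3 (by omega) (fun s _ => (pvRank_bounds s).2)
    have hM : pvM ttps = 3 := by omega
    rw [hM, if_pos h1]; decide
  rw [if_neg h1]
  have hno3 : ∀ t ∈ ttps, pvRankDict.getD t 0 ≤ 2 := by
    intro t ht
    have hnc : ¬ PySem.Set.contains (PySem.Set.ofList ["T1486", "T1490", "T1498"]) t = true := by
      intro hc
      exact h1 (List.any_eq_true.2 ⟨t, ht, hc⟩)
    have hnm : ¬ (t = "T1486" ∨ t = "T1490" ∨ t = "T1498") := by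
      intro hm
      exact hnc ((PySem.Set.contains_iff _ _).2 (by simpa [PySem.Set.mem_ofList] using hm))
    rw [pvRank_char, if_neg hnm]
    split_ifs <;> omega
  by_cases h2 : ttps.any (fun t => PySem.Set.contains (PySem.Set.ofList ["T1041", "T1071", "T1021", "T1068"]) t) = true
  · obtain ⟨t, ht, hc⟩ := List.any_eq_true.1 h2
    have hmem : t = "T1041" ∨ t = "T1071" ∨ t = "T1021" ∨ t = "T1068" := by
      have := (PySem.Set.contains_iff _ _).1 hc
      simpa [PySem.Set.mem_ofList] using this
    have hrt : pvRankDict.getD t 0 = 2 := by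
      rw [pvRank_char, if_neg (by rcases hmem with h | h | h | h <;> subst h <;> decide), if_pos hmem]
    have hge := pvM_ge_mem ttps t ht
    have hle := pvM_le ttps 2 (by omega) hno3
    have hM : pvM ttps = 2 := by omega
    rw [hM, if_pos h2]; decide
  rw [if_neg h2]
  have hno2 : ∀ t ∈ ttps, pvRankDict.getD t 0 ≤ 1 := by
    intro t ht
    have hnc : ¬ PySem.Set.contains (PySem.Set.ofList ["T1041", "T1071", "T1021", "T1068"]) t = true := by
      intro hc
      exact h2 (List.any_eq_true.2 ⟨t, ht, hc⟩)
    have hnm : ¬ (t = "T1041" ∨ t = "T1071" ∨ t = "T1021" ∨ t = "T1068") := by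
      intro hm
      exact hnc ((PySem.Set.contains_iff _ _).2 (by simpa [PySem.Set.mem_ofList] using hm))
    have := hno3 t ht
    rw [pvRank_char] at this ⊢
    split_ifs at this ⊢ <;> simp_all
  by_cases h3 : ttps.any (fun t => PySem.Set.contains (PySem.Set.ofList ["T1078", "T1110", "T1595"]) t) = true
  · obtain ⟨t, ht, hc⟩ := List.any_eq_true.1 h3
    have hmem : t = "T1078" ∨ t = "T1110" ∨ t = "T1595" := by
      have := (PySem.Set.contains_iff _ _).1 hc
      simpa [PySem.Set.mem_ofList] using this
    have hrt : pvRankDict.getD t 0 = 1 := by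
      rw [pvRank_char, if_neg (by rcases hmem with h | h | h <;> subst h <;> decide),
          if_neg (by rcases hmem with h | h | h <;> subst h <;> decide), if_pos hmem]
    have hge := pvM_ge_mem ttps t ht
    have hle := pvM_le ttps 1 (by omega) hno2
    have hM : pvM ttps = 1 := by omega
    rw [hM, if_pos h3]; decide
  rw [if_neg h3]
  have hno1 : ∀ t ∈ ttps, pvRankDict.getD t 0 ≤ 0 := by
    intro t ht
    have hnc : ¬ PySem.Set.contains (PySem.Set.ofList ["T1078", "T1110", "T1595"]) t = true := by
      intro hc
      exact h3 (List.any_eq_true.2 ⟨t, ht, hc⟩)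
    have hnm : ¬ (t = "T1078" ∨ t = "T1110" ∨ t = "T1595") := by
      intro hm
      exact hnc ((PySem.Set.contains_iff _ _).2 (by simpa [PySem.Set.mem_ofList] using hm))
    have := hno2 t ht
    rw [pvRank_char] at this ⊢
    split_ifs at this ⊢ <;> simp_all
  have hle := pvM_le ttps 0 le_rfl hno1
  have hM : pvM ttps = 0 := by omega
  rw [hM]; decide
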